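-- pv_equiv track=rewrite | github.com/Ventmaster/GFGPoTD | 12 Apr 24 - Sum of Products.py | pairAndSum
-- ===== SOURCE A (Python) =====
-- def pairAndSum(n, arr):
--     #code here
--     sop = 0
--
--     for i in range(32):
--         count = 0
--
--         for j in arr:
--             if j & (1 << i):
--                 count += 1
--
--         sop += count * (count - 1) // 2 * (1 << i)
--
--     return sop
-- ===== SOURCE B (Python) =====
-- def pairAndSum(n, arr):
--     total = 0
--     seen = []
--     for x in arr:
--         for y in seen:
--             total += (x & y) & 0xFFFFFFFF
--         seen.append(x)
--     return total
-- ===== Notes on version B (the rewrite author's own statement) =====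
-- stated objective: alternative
-- what changed: Replaces the per-bit counting pass (count set bits at each of 32 positions, sum count*(count-1)/2 * 2^i) with a direct one-pass pairwise accumulation of (x & y) & 0xFFFFFFFF over each unordered pair.
import Mathlib
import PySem

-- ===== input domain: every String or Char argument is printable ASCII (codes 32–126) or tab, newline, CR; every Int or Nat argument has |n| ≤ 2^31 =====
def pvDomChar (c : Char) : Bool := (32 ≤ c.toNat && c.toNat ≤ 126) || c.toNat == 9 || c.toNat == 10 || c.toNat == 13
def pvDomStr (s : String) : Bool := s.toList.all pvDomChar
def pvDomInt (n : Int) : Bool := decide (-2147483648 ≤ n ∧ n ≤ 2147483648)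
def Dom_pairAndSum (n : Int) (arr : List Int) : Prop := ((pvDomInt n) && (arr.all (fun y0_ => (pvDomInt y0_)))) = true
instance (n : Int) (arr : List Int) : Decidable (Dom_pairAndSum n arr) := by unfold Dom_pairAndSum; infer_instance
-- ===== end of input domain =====

-- B replaces A's per-bit counting pass by a direct one-pass pairwise accumulation of
-- (x & y) & 0xFFFFFFFF over each unordered pair (alternative algorithm, not faster).

-- ===== PORT A =====
-- literal port of A: for i in range(32): count elements with bit i set; sop += count*(count-1)//2 * (1<<i)
-- (i drawn from pyRange 0 32 1 is nonnegative, so 'i.toNat' is exactly Python's i in '1 << i')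
def pairAndSum (n : Int) (arr : List Int) : Int :=
  (PySem.List.pyRange 0 32 1).foldl (fun sop i =>
    let count := arr.foldl (fun count j =>
      if PySem.Int.band j ((1 : Int) <<< i.toNat) ≠ 0 then count + 1 else count) 0
    sop + PySem.Int.floordiv (count * (count - 1)) 2 * ((1 : Int) <<< i.toNat)) 0

-- ===== PORT B =====
-- literal port of Source B: one pass, state (total, seen); inner loop over seen adds (x & y) & 0xFFFFFFFF
def pairAndSum_alt (n : Int) (arr : List Int) : Int :=
  (arr.foldl (fun (st : Int × List Int) x =>
      (st.2.foldl (fun total y =>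
          total + PySem.Int.band (PySem.Int.band x y) 4294967295) st.1,
       st.2 ++ [x])) (0, [])).1

-- ===== PRECONDITION & SPEC =====
def Spec_pairAndSum (n : Int) (arr : List Int) (out : Int) : Prop := out = pairAndSum_alt n arr
instance (n : Int) (arr : List Int) (out : Int) : Decidable (Spec_pairAndSum n arr out) := by unfold Spec_pairAndSum; infer_instance

-- ===== CLAIM (what is proved, stated in full; the proofs are below) =====
def Claim_equal_pairAndSum : Prop := ∀ (n : Int) (arr : List Int), Dom_pairAndSum n arr → Spec_pairAndSum n arr (pairAndSum n arr)

-- ===== LEMMAS AND PROOFS =====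

-- 32-bit two's-complement truncation of a Python int, and its bits
def pvV (x : Int) : Nat := (x % 4294967296).toNat
def pvBit (x : Int) (i : Nat) : Bool := (pvV x).testBit i
-- number of elements of arr whose bit i is set (in the 32-bit truncation)
def pvCnt (arr : List Int) (i : Nat) : Nat := arr.countP (fun j => pvBit j i)
def pvTri (c : Nat) : Nat := c * (c - 1) / 2
-- the value A computes, at the Nat level
def pvSA (arr : List Int) : Nat :=
  ((List.range 32).map (fun i => 2 ^ i * pvTri (pvCnt arr i))).sum
-- the value B computes, at the Nat level (seen-prefix recursion)
def pvPairSum (seen : List Int) : List Int → Nat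
  | [] => 0
  | x :: xs => (seen.map (fun y => pvV x &&& pvV y)).sum + pvPairSum (seen ++ [x]) xs

-- ---- generic list-sum helpers ----
theorem pv_foldl_add_eq_sum (l : List Int) (f : Int → Int) (c : Int) :
    l.foldl (fun s a => s + f a) c = c + (l.map f).sum := by
  induction l generalizing c with
  | nil => simp
  | cons a l ih => simp [ih, add_assoc]

theorem pv_sum_map_add (l : List Nat) (f g : Nat → Nat) :
    (l.map (fun i => f i + g i)).sum = (l.map f).sum + (l.map g).sum := by
  induction l with
  | nil => simp
  | cons a l ih => simp [ih]; omega

-- ---- Nat bit lemmas ----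
theorem pv_and_div_two (m t : Nat) : (m &&& t) / 2 = m / 2 &&& t / 2 := by
  apply Nat.eq_of_testBit_eq
  intro i
  have h1 : ((m &&& t) / 2).testBit i = (m &&& t).testBit (i + 1) := by
    rw [← Nat.testBit_succ]
  rw [h1, Nat.testBit_land, Nat.testBit_land, ← Nat.testBit_succ, ← Nat.testBit_succ]

theorem pv_and_mod_two (m t : Nat) : (m &&& t) % 2 = m % 2 * (t % 2) := by
  have h0 := Nat.testBit_zero (m &&& t)
  rw [Nat.testBit_land, Nat.testBit_zero, Nat.testBit_zero, ← Bool.decide_and] at h0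
  rw [decide_eq_decide] at h0
  rcases Nat.mod_two_eq_zero_or_one m with hm | hm <;>
    rcases Nat.mod_two_eq_zero_or_one t with ht | ht <;> rw [hm, ht] <;> omega

theorem pv_testBit_sub_and (i : Nat) : ∀ m t : Nat,
    (m - (m &&& t)).testBit i = (m.testBit i && !(t.testBit i)) := by
  induction i with
  | zero =>
    intro m t
    have h := pv_and_mod_two m t
    have hand : m &&& t ≤ m := Nat.and_le_left
    have hdiv : (m &&& t) / 2 ≤ m / 2 := by
      rw [pv_and_div_two]; exact Nat.and_le_left
    rw [Nat.testBit_zero, Nat.testBit_zero, Nat.testBit_zero]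
    rcases Nat.mod_two_eq_zero_or_one m with hm | hm <;>
      rcases Nat.mod_two_eq_zero_or_one t with ht | ht <;>
        rw [hm, ht] at h ⊢ <;>
        · have hsub : (m - (m &&& t)) % 2 = m % 2 - (m &&& t) % 2 := by omega
          rw [hsub, hm, h]
          simp
  | succ i ih =>
    intro m t
    have h := pv_and_mod_two m t
    have hand : m &&& t ≤ m := Nat.and_le_left
    have hdiv : (m &&& t) / 2 ≤ m / 2 := by
      rw [pv_and_div_two]; exact Nat.and_le_left
    have hle : (m &&& t) % 2 ≤ m % 2 := by
      rcases Nat.mod_two_eq_zero_or_one m with hm | hm <;>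
        rcases Nat.mod_two_eq_zero_or_one t with ht | ht <;> rw [hm, ht] at h <;> omega
    have hq : (m - (m &&& t)) / 2 = m / 2 - (m &&& t) / 2 := by omega
    rw [Nat.testBit_succ, Nat.testBit_succ, Nat.testBit_succ, hq, pv_and_div_two]
    exact ih (m / 2) (t / 2)

theorem pv_testBit_zero_div (k : Nat) : ∀ n : Nat, (n / 2 ^ k).testBit 0 = n.testBit k := by
  induction k with
  | zero => intro n; simp
  | succ k ih =>
    intro n
    have h : n / 2 ^ (k + 1) = n / 2 / 2 ^ k := by
      rw [Nat.div_div_eq_div_mul, pow_succ]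
      ring_nf
    rw [h, ih (n / 2), ← Nat.testBit_succ]

theorem pv_decomp (k : Nat) : ∀ n : Nat,
    ((List.range k).map (fun i => 2 ^ i * (n.testBit i).toNat)).sum = n % 2 ^ k := by
  induction k with
  | zero => intro n; simp [Nat.mod_one]
  | succ k ih =>
    intro n
    rw [List.range_succ, List.map_append, List.sum_append, ih]
    have hbit : (n.testBit k).toNat = n / 2 ^ k % 2 := by
      rw [← pv_testBit_zero_div k n, Nat.testBit_zero]
      rcases Nat.mod_two_eq_zero_or_one (n / 2 ^ k) with h | h <;> simp [h]
    simp [hbit, Nat.mod_pow_succ]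

-- ---- Int-side bridge lemmas ----
theorem pv_v_lt (x : Int) : pvV x < 4294967296 := by
  unfold pvV
  have h1 : x % 4294967296 < 4294967296 := Int.emod_lt_of_pos x (by norm_num)
  omega

theorem pv_negmod (t : Nat) :
    (-(t : Int) - 1) % 4294967296 = ((4294967295 - t % 4294967296 : Nat) : Int) := by
  have hmod : t % 4294967296 < 4294967296 := Nat.mod_lt _ (by norm_num)
  have hle : t % 4294967296 ≤ 4294967295 := by omega
  have hdm := Nat.div_add_mod t 4294967296
  have h1 : (-(t : Int) - 1)
      = ((4294967295 - t % 4294967296 : Nat) : Int)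
        + 4294967296 * (-((t / 4294967296 : Nat) : Int) - 1) := by
    rw [Nat.cast_sub hle]
    push_cast
    omega
  rw [h1, Int.add_mul_emod_self_left]
  refine Int.emod_eq_of_lt (by positivity) ?_
  have h2 : (4294967295 - t % 4294967296 : Nat) < 4294967296 := by omega
  exact_mod_cast h2

theorem pv_v_neg (t : Nat) : pvV (-(t : Int) - 1) = 4294967295 - t % 4294967296 := by
  unfold pvV; rw [pv_negmod]; exact Int.toNat_natCast _

theorem pv_v_nat (a : Nat) : pvV (a : Int) = a % 4294967296 := by
  unfold pvV
  rw [show ((4294967296 : Int)) = ((4294967296 : Nat) : Int) from rfl, ← Int.natCast_mod]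
  exact Int.toNat_natCast _

theorem pv_bit_nat (a : Nat) (i : Nat) :
    pvBit (a : Int) i = (decide (i < 32) && a.testBit i) := by
  unfold pvBit
  rw [pv_v_nat, show (4294967296 : Nat) = 2 ^ 32 from rfl, Nat.testBit_mod_two_pow]

theorem pv_bit_neg (t : Nat) (i : Nat) (hi : i < 32) :
    pvBit (-(t : Int) - 1) i = !(t.testBit i) := by
  unfold pvBit
  rw [pv_v_neg]
  have hmask : 4294967295 - t % 4294967296 = 4294967295 - (4294967295 &&& t) := by
    rw [Nat.land_comm, show (4294967295 : Nat) = 2 ^ 32 - 1 from rfl,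
      Nat.and_two_pow_sub_one_eq_mod]
  rw [hmask, pv_testBit_sub_and]
  have h1 : (4294967295 : Nat).testBit i = true := by
    rw [show (4294967295 : Nat) = 2 ^ 32 - 1 from rfl, Nat.testBit_two_pow_sub_one]
    simpa using hi
  simp [h1]

theorem pv_neg_repr (x : Int) (h : ¬ 0 ≤ x) : x = -(((-x - 1).toNat : Nat) : Int) - 1 := by
  have : ((-x - 1).toNat : Int) = -x - 1 := Int.toNat_of_nonneg (by omega)
  omega

theorem pv_bit_of_nonneg (x : Int) (i : Nat) (h : 0 ≤ x) (hi : i < 32) :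
    pvBit x i = x.toNat.testBit i := by
  conv_lhs => rw [← Int.toNat_of_nonneg h]
  rw [pv_bit_nat]
  simp [hi]

theorem pv_bit_of_neg (x : Int) (i : Nat) (h : ¬ 0 ≤ x) (hi : i < 32) :
    pvBit x i = !((-x - 1).toNat.testBit i) := by
  conv_lhs => rw [pv_neg_repr x h]
  exact pv_bit_neg _ _ hi

theorem pv_bit_band (x y : Int) (i : Nat) (hi : i < 32) :
    pvBit (PySem.Int.band x y) i = (pvBit x i && pvBit y i) := by
  by_cases hx : 0 ≤ x <;> by_cases hy : 0 ≤ y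
  · have he : PySem.Int.band x y = ((x.toNat &&& y.toNat : Nat) : Int) := by
      unfold PySem.Int.band; rw [if_pos hx, if_pos hy]
    rw [he, pv_bit_nat, Nat.testBit_land, pv_bit_of_nonneg x i hx hi,
      pv_bit_of_nonneg y i hy hi]
    simp [hi]
  · have he : PySem.Int.band x y = ((x.toNat - (x.toNat &&& (-y - 1).toNat) : Nat) : Int) := by
      unfold PySem.Int.band; rw [if_pos hx, if_neg hy]
    rw [he, pv_bit_nat, pv_testBit_sub_and, pv_bit_of_nonneg x i hx hi,
      pv_bit_of_neg y i hy hi]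
    simp [hi]
  · have he : PySem.Int.band x y = ((y.toNat - (y.toNat &&& (-x - 1).toNat) : Nat) : Int) := by
      unfold PySem.Int.band; rw [if_neg hx, if_pos hy]
    rw [he, pv_bit_nat, pv_testBit_sub_and, pv_bit_of_nonneg y i hy hi,
      pv_bit_of_neg x i hx hi]
    simp [hi]
    rw [Bool.and_comm]
  · have he : PySem.Int.band x y
        = -((((-x - 1).toNat ||| (-y - 1).toNat : Nat) : Int)) - 1 := by
      unfold PySem.Int.band; rw [if_neg hx, if_neg hy]
    rw [he, pv_bit_neg _ _ hi, Nat.testBit_or, pv_bit_of_neg x i hx hi,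
      pv_bit_of_neg y i hy hi]
    simp

theorem pv_band_mask_v (z : Int) :
    PySem.Int.band z 4294967295 = ((pvV z : Nat) : Int) := by
  have hm : (0 : Int) ≤ 4294967295 := by norm_num
  by_cases hz : 0 ≤ z
  · have he : PySem.Int.band z 4294967295
        = ((z.toNat &&& (4294967295 : Int).toNat : Nat) : Int) := by
      unfold PySem.Int.band; rw [if_pos hz, if_pos hm]
    rw [he]
    conv_rhs => rw [← Int.toNat_of_nonneg hz, pv_v_nat]
    rw [show ((4294967295 : Int)).toNat = 2 ^ 32 - 1 from rfl,
      Nat.and_two_pow_sub_one_eq_mod]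
  · have he : PySem.Int.band z 4294967295
        = (((4294967295 : Int).toNat - ((4294967295 : Int).toNat &&& (-z - 1).toNat) : Nat) : Int) := by
      unfold PySem.Int.band; rw [if_neg hz, if_pos hm]
    rw [he]
    conv_rhs => rw [pv_neg_repr z hz, pv_v_neg]
    rw [show ((4294967295 : Int)).toNat = (4294967295 : Nat) from rfl]
    rw [show ((4294967295 : Nat) &&& (-z - 1).toNat) = (-z - 1).toNat % 4294967296 from by
      rw [Nat.land_comm, show (4294967295 : Nat) = 2 ^ 32 - 1 from rfl,
        Nat.and_two_pow_sub_one_eq_mod]]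

theorem pv_v_band (x y : Int) : pvV (PySem.Int.band x y) = pvV x &&& pvV y := by
  apply Nat.eq_of_testBit_eq
  intro i
  by_cases hi : i < 32
  · rw [Nat.testBit_land]
    exact pv_bit_band x y i hi
  · have h32 : (2 : Nat) ^ 32 ≤ 2 ^ i := Nat.pow_le_pow_right (by norm_num) (by omega)
    have h1 : pvV (PySem.Int.band x y) < 2 ^ i := lt_of_lt_of_le (pv_v_lt _) h32
    have h2 : pvV x < 2 ^ i := lt_of_lt_of_le (pv_v_lt _) h32
    rw [Nat.testBit_lt_two_pow h1, Nat.testBit_land,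
      Nat.testBit_lt_two_pow h2, Bool.false_and]

theorem pv_band_pair (x y : Int) :
    PySem.Int.band (PySem.Int.band x y) 4294967295 = ((pvV x &&& pvV y : Nat) : Int) := by
  rw [pv_band_mask_v, pv_v_band]

theorem pv_single (x : Int) (i : Nat) (hi : i < 32) :
    (PySem.Int.band x ((1 : Int) <<< ((i : Nat) : Int)) ≠ 0) ↔ pvBit x i = true := by
  have hsh : ((1 : Int) <<< ((i : Nat) : Int)) = (((2 ^ i : Nat)) : Int) := Int.one_shiftLeft i
  have hpow : (0 : Int) ≤ ((2 ^ i : Nat) : Int) := by positivity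
  have hp0 : (2 : Nat) ^ i ≠ 0 := by positivity
  rw [hsh]
  by_cases hx : 0 ≤ x
  · have he : PySem.Int.band x ((2 ^ i : Nat) : Int)
        = ((x.toNat &&& ((2 ^ i : Nat) : Int).toNat : Nat) : Int) := by
      unfold PySem.Int.band; rw [if_pos hx, if_pos hpow]
    rw [he, pv_bit_of_nonneg x i hx hi, Int.toNat_natCast, Nat.and_two_pow]
    rcases Bool.eq_false_or_eq_true (x.toNat.testBit i) with h | h <;> simp [h]
  · have he : PySem.Int.band x ((2 ^ i : Nat) : Int)
        = ((((2 ^ i : Nat) : Int).toNat - (((2 ^ i : Nat) : Int).toNat &&& (-x - 1).toNat) : Nat) : Int) := by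
      unfold PySem.Int.band; rw [if_neg hx, if_pos hpow]
    rw [he, pv_bit_of_neg x i hx hi, Int.toNat_natCast, Nat.two_pow_and]
    rcases Bool.eq_false_or_eq_true ((-x - 1).toNat.testBit i) with h | h <;>
      rw [h] <;> simp

-- ---- A-side characterization ----
theorem pv_count_fold (arr : List Int) (i : Nat) (hi : i < 32) : ∀ c : Int,
    arr.foldl (fun count j =>
      if PySem.Int.band j ((1 : Int) <<< ((i : Nat) : Int)) ≠ 0 then count + 1 else count) c
      = c + (pvCnt arr i : Int) := by
  induction arr with
  | nil => intro c; simp [pvCnt]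
  | cons a l ih =>
    intro c
    have hcond : (PySem.Int.band a ((1 : Int) <<< ((i : Nat) : Int)) ≠ 0) ↔ pvBit a i = true := pv_single a i hi
    by_cases hb : pvBit a i = true
    · simp only [List.foldl_cons, if_pos (hcond.mpr hb), ih]
      unfold pvCnt
      rw [List.countP_cons]
      simp [hb]
      ring
    · have hb' : ¬ (PySem.Int.band a ((1 : Int) <<< ((i : Nat) : Int)) ≠ 0) := fun h => hb (hcond.mp h)
      simp only [List.foldl_cons, if_neg hb', ih]
      unfold pvCnt
      rw [List.countP_cons]
      simp [hb]

theorem pv_tri_cast (c : Nat) :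
    PySem.Int.floordiv ((c : Int) * ((c : Int) - 1)) 2 = (pvTri c : Int) := by
  cases c with
  | zero => decide
  | succ m =>
    have h1 : ((m + 1 : Nat) : Int) * (((m + 1 : Nat) : Int) - 1) = (((m + 1) * m : Nat) : Int) := by
      push_cast; ring
    rw [h1, PySem.Int.floordiv_eq_ediv_of_pos (by norm_num)]
    rw [show (2 : Int) = ((2 : Nat) : Int) from rfl, ← Int.natCast_div]
    unfold pvTri
    norm_num

theorem pv_A_fold (arr : List Int) : ∀ (l : List Nat), (∀ k ∈ l, k < 32) → ∀ (c : Int),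
    l.foldl (fun sop k =>
      sop + PySem.Int.floordiv
        ((arr.foldl (fun count j =>
            if PySem.Int.band j ((1 : Int) <<< ((k : Nat) : Int)) ≠ 0 then count + 1 else count) 0)
          * ((arr.foldl (fun count j =>
            if PySem.Int.band j ((1 : Int) <<< ((k : Nat) : Int)) ≠ 0 then count + 1 else count) 0) - 1)) 2
        * ((1 : Int) <<< ((k : Nat) : Int))) c
    = c + ((l.map (fun k => 2 ^ k * pvTri (pvCnt arr k))).sum : Int) := by
  intro l
  induction l with
  | nil => intro _ c; simp
  | cons k l ih =>
    intro hmem c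
    have hk : k < 32 := hmem k (by simp)
    simp only [List.foldl_cons]
    rw [ih (fun x hx => hmem x (by simp [hx]))]
    rw [pv_count_fold arr k hk 0, zero_add, pv_tri_cast, Int.one_shiftLeft k]
    simp only [List.map_cons, List.sum_cons]
    push_cast
    ring

theorem pv_A_char (n : Int) (arr : List Int) : pairAndSum n arr = (pvSA arr : Int) := by
  unfold pairAndSum
  rw [PySem.List.pyRange_one]
  rw [show ((32 : Int) - 0).toNat = 32 from rfl]
  rw [List.foldl_map]
  simp only [zero_add, Int.toNat_natCast]
  rw [pv_A_fold arr (List.range 32) (fun k hk => List.mem_range.mp hk) 0, zero_add]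
  rfl

-- ---- B-side characterization ----
theorem pv_B_state (arr : List Int) : ∀ (c : Int) (s : List Int),
    arr.foldl (fun (st : Int × List Int) x =>
      (st.2.foldl (fun total y =>
          total + PySem.Int.band (PySem.Int.band x y) 4294967295) st.1,
       st.2 ++ [x])) (c, s)
    = (c + (pvPairSum s arr : Int), s ++ arr) := by
  induction arr with
  | nil => intro c s; simp [pvPairSum]
  | cons x xs ih =>
    intro c s
    simp only [List.foldl_cons]
    rw [pv_foldl_add_eq_sum s (fun y => PySem.Int.band (PySem.Int.band x y) 4294967295) c, ih]
    have hsum : (s.map (fun y => PySem.Int.band (PySem.Int.band x y) 4294967295)).sum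
        = ((s.map (fun y => pvV x &&& pvV y)).sum : Int) := by
      induction s with
      | nil => simp
      | cons a l ihs =>
        simp only [List.map_cons, List.sum_cons, pv_band_pair]
        push_cast
        rw [List.map_map]
        rfl
    rw [hsum]
    simp only [pvPairSum, Prod.mk.injEq]
    constructor
    · push_cast; ring
    · simp

theorem pv_B_char (n : Int) (arr : List Int) :
    pairAndSum_alt n arr = (pvPairSum [] arr : Int) := by
  unfold pairAndSum_alt
  rw [pv_B_state arr 0 []]
  simp

-- ---- the crux: pvSA = pvPairSum ----
theorem pv_tri_step (c : Nat) (b : Nat) (hb : b ≤ 1) :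
    pvTri (c + b) = pvTri c + b * c := by
  interval_cases b
  · simp [pvTri]
  · unfold pvTri
    have h : (c + 1) * (c + 1 - 1) = c * (c - 1) + 2 * c := by
      cases c with
      | zero => rfl
      | succ m => simp only [Nat.add_sub_cancel]; ring
    have h2 : 2 ∣ c * (c - 1) := by
      cases c with
      | zero => simp
      | succ m => simpa [Nat.mul_comm] using (Nat.even_mul_succ_self m).two_dvd
    omega

theorem pv_cnt_append (l : List Int) (x : Int) (i : Nat) :
    pvCnt (l ++ [x]) i = pvCnt l i + (pvBit x i).toNat := by
  unfold pvCnt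
  rw [List.countP_append]
  simp [List.countP_cons]
  cases hb : pvBit x i <;> simp [hb]

theorem pv_bitsum (x y : Int) :
    ((List.range 32).map (fun i => 2 ^ i * ((pvBit x i).toNat * (pvBit y i).toNat))).sum
      = pvV x &&& pvV y := by
  have hlt : pvV x &&& pvV y < 2 ^ 32 :=
    lt_of_le_of_lt Nat.and_le_left (pv_v_lt x)
  have heq : ∀ i ∈ List.range 32,
      2 ^ i * ((pvBit x i).toNat * (pvBit y i).toNat)
      = 2 ^ i * ((pvV x &&& pvV y).testBit i).toNat := by
    intro i _
    rw [Nat.testBit_land]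
    unfold pvBit
    cases hx : (pvV x).testBit i <;> cases hy : (pvV y).testBit i <;> simp [hx, hy]
  rw [List.map_congr_left heq, pv_decomp 32 (pvV x &&& pvV y), Nat.mod_eq_of_lt hlt]

theorem pv_cross (x : Int) (l : List Int) :
    ((List.range 32).map (fun i => 2 ^ i * ((pvBit x i).toNat * pvCnt l i))).sum
      = (l.map (fun y => pvV x &&& pvV y)).sum := by
  induction l with
  | nil => simp [pvCnt]
  | cons a l ih =>
    have hstep : ∀ i ∈ List.range 32,
        2 ^ i * ((pvBit x i).toNat * pvCnt (a :: l) i)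
        = 2 ^ i * ((pvBit x i).toNat * (pvBit a i).toNat)
          + 2 ^ i * ((pvBit x i).toNat * pvCnt l i) := by
      intro i _
      have : pvCnt (a :: l) i = (pvBit a i).toNat + pvCnt l i := by
        unfold pvCnt; rw [List.countP_cons]
        cases hb : pvBit a i <;> simp [hb] <;> omega
      rw [this]; ring
    rw [List.map_congr_left hstep, pv_sum_map_add, pv_bitsum x a, ih]
    simp

theorem pv_SA_append (l : List Int) (x : Int) :
    pvSA (l ++ [x]) = pvSA l + (l.map (fun y => pvV x &&& pvV y)).sum := by
  unfold pvSA
  have hstep : ∀ i ∈ List.range 32,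
      2 ^ i * pvTri (pvCnt (l ++ [x]) i)
      = 2 ^ i * pvTri (pvCnt l i) + 2 ^ i * ((pvBit x i).toNat * pvCnt l i) := by
    intro i _
    rw [pv_cnt_append, pv_tri_step (pvCnt l i) ((pvBit x i).toNat)
      (by cases pvBit x i <;> simp)]
    ring
  rw [List.map_congr_left hstep, pv_sum_map_add, pv_cross]

theorem pv_SA_pairSum : ∀ (xs seen : List Int),
    pvSA (seen ++ xs) = pvSA seen + pvPairSum seen xs := by
  intro xs
  induction xs with
  | nil => intro seen; simp [pvPairSum]
  | cons x xs ih =>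
    intro seen
    have h1 : seen ++ x :: xs = (seen ++ [x]) ++ xs := by simp
    rw [h1, ih (seen ++ [x]), pv_SA_append]
    simp only [pvPairSum]
    omega

theorem pv_SA_nil : pvSA [] = 0 := by
  have : ∀ i ∈ List.range 32, 2 ^ i * pvTri (pvCnt ([] : List Int) i) = 0 := by
    intro i _
    simp [pvCnt, pvTri]
  unfold pvSA
  rw [List.map_congr_left this]
  simp

-- ===== VERDICT (by name: the statement is the Claim_ definition above) =====
theorem pairAndSum_spec : Claim_equal_pairAndSum := by
  intro n arr _
  unfold Spec_pairAndSum
  rw [pv_A_char, pv_B_char]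
  have h := pv_SA_pairSum arr []
  rw [List.nil_append, pv_SA_nil, zero_add] at h
  rw [h]
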